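-- pv_equiv track=rewrite | github.com/mo-han/mo-han-toolbox | mylib/text_ez.py | split_by_length_or_newline
-- ===== SOURCE A (Python) =====
-- def split_by_length_or_newline(x: str, length: int):
--     parts = []
--     while x:
--         if len(x) > length:
--             part = x[:length]
--             stop = part.rfind('\n') + 1
--             if stop:
--                 parts.append(x[:stop])
--                 x = x[stop:]
--             else:
--                 parts.append(part)
--                 x = x[length:]
--         else:
--             parts.append(x)
--             break
--     return parts
-- ===== SOURCE B (Python) =====
-- def split_by_length_or_newline(x: str, length: int):
--     n = len(x)
--     if n == 0:
--         return []
--     parts = []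
--     start = 0
--     while n - start > length:
--         nl = x.rfind('\n', start, start + length)
--         nxt = nl + 1 if nl >= 0 else start + length
--         parts.append(x[start:nxt])
--         start = nxt
--     parts.append(x[start:])
--     return parts
-- ===== Notes on version B (the rewrite author's own statement) =====
-- stated objective: alternative
-- what changed: B makes a single pass over the string with a moving start index and a bounded rfind, instead of repeatedly slicing and reassigning the remainder of the string each iteration; it trades A's remainder re-slicing for index arithmetic.
import Mathlib
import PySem

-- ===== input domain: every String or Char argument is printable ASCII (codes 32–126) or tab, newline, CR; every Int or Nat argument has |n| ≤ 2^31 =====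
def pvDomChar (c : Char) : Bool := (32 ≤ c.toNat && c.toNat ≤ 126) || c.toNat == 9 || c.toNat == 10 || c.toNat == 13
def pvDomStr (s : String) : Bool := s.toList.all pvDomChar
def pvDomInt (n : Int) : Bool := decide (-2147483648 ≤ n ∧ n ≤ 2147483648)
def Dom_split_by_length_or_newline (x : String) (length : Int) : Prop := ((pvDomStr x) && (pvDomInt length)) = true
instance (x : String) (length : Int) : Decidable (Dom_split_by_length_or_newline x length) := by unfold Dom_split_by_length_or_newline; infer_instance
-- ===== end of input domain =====

-- B replaces A's repeated remainder re-slicing by a single pass over the string with a moving start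
-- index and a bounded rfind (objective: alternative; equal on Pre_: length ≥ 1 or x empty, where A terminates).


-- ===== PORT A =====
-- Python str.rfind('\n') over the code points: index of the last '\n', or -1 (exact; hand-ported,
-- shared library primitive of both ports).
def pyRfindNl : List Char → Int
  | [] => -1
  | c :: rest =>
    let r := pyRfindNl rest
    if r ≥ 0 then r + 1 else if c = '\n' then 0 else -1

-- A's while-loop; fuel = one unit per iteration (x.length + 1 suffices whenever A terminates).
def aLoop (fuel : Nat) (x : List Char) (length : Int) (parts : List (List Char)) : List (List Char) :=
  match fuel with
  | 0 => parts
  | fuel + 1 =>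
    if x = [] then parts
    else if (x.length : Int) > length then
      let part := PySem.List.slice x none (some length)
      let stop := pyRfindNl part + 1
      if stop ≠ 0 then
        aLoop fuel (PySem.List.slice x (some stop) none) length
          (parts ++ [PySem.List.slice x none (some stop)])
      else
        aLoop fuel (PySem.List.slice x (some length) none) length (parts ++ [part])
    else parts ++ [x]

def split_by_length_or_newline (x : String) (length : Int) : List String :=
  (aLoop (x.toList.length + 1) x.toList length []).map String.ofList

-- ===== PORT B =====
-- Python x.rfind('\n', a, b) for 0 ≤ a ≤ b (exact there): absolute index of last '\n' in x[a:b], or -1.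
def pyRfindNlIn (cs : List Char) (a b : Int) : Int :=
  let r := pyRfindNl (PySem.List.slice cs (some a) (some b))
  if r ≥ 0 then a + r else -1

-- B's while-loop; fuel = one unit per iteration.
def bLoop (fuel : Nat) (cs : List Char) (n : Int) (length : Int) (start : Int)
    (parts : List (List Char)) : List (List Char) :=
  match fuel with
  | 0 => parts
  | fuel + 1 =>
    if n - start > length then
      let nl := pyRfindNlIn cs start (start + length)
      let nxt := if nl ≥ 0 then nl + 1 else start + length
      bLoop fuel cs n length nxt (parts ++ [PySem.List.slice cs (some start) (some nxt)])
    else parts ++ [PySem.List.slice cs (some start) none]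

def split_by_length_or_newline_alt (x : String) (length : Int) : List String :=
  let cs := x.toList
  let n : Int := cs.length
  if n = 0 then []
  else (bLoop (cs.length + 1) cs n length 0 []).map String.ofList

-- ===== PRECONDITION & SPEC =====
-- A loops forever when length ≤ 0 and x is nonempty (the remainder never shrinks to empty): those
-- inputs, on which A never returns, are excluded.
def Pre_split_by_length_or_newline (x : String) (length : Int) : Prop := x.toList = [] ∨ 1 ≤ length
instance (x : String) (length : Int) : Decidable (Pre_split_by_length_or_newline x length) := by unfold Pre_split_by_length_or_newline; infer_instance
def pvWitness_split_by_length_or_newline : String × Int := ("ab\ncd", 3)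

def Spec_split_by_length_or_newline (x : String) (length : Int) (out : List String) : Prop := out = split_by_length_or_newline_alt x length
instance (x : String) (length : Int) (out : List String) : Decidable (Spec_split_by_length_or_newline x length out) := by unfold Spec_split_by_length_or_newline; infer_instance

-- ===== CLAIM (what is proved, stated in full; the proofs are below) =====
def Claim_equal_split_by_length_or_newline : Prop := ∀ (x : String) (length : Int), Dom_split_by_length_or_newline x length → Pre_split_by_length_or_newline x length → Spec_split_by_length_or_newline x length (split_by_length_or_newline x length)

-- ===== LEMMAS AND PROOFS =====

theorem pyRfindNl_lt_length (cs : List Char) : pyRfindNl cs < cs.length := by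
  induction cs with
  | nil => simp [pyRfindNl]
  | cons c rest ih =>
    simp only [pyRfindNl, List.length_cons]
    split_ifs <;> push_cast <;> omega

theorem pyRfindNl_ge_neg_one (cs : List Char) : -1 ≤ pyRfindNl cs := by
  induction cs with
  | nil => simp [pyRfindNl]
  | cons c rest ih =>
    simp only [pyRfindNl]
    split_ifs <;> omega

-- The main loop correspondence: with s the number of consumed characters, A's loop on the
-- remainder cs.drop s equals B's loop on cs with start index s.
theorem loop_eq (fuel : Nat) (cs : List Char) (length : Int) (s : Nat)
    (hs : s < cs.length) (hlen : 1 ≤ length) (hfuel : cs.length - s < fuel)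
    (parts : List (List Char)) :
    aLoop fuel (cs.drop s) length parts
      = bLoop fuel cs (cs.length : Int) length (s : Int) parts := by
  induction fuel generalizing s parts with
  | zero => omega
  | succ fuel ih =>
    have hne : cs.drop s ≠ [] := by
      intro h; have := List.length_drop (l := cs) (i := s); rw [h] at this; simp at this; omega
    have hdlen : (cs.drop s).length = cs.length - s := List.length_drop
    by_cases hbig : ((cs.drop s).length : Int) > length
    · -- both loops take a step
      have hbig' : (cs.length : Int) - (s : Int) > length := by
        rw [hdlen] at hbig; omega
      have hlen0 : (0:Int) ≤ length := by omega
      have hslice : PySem.List.slice cs (some (s : Int)) (some ((s : Int) + length))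
          = PySem.List.slice (cs.drop s) none (some length) := by
        obtain ⟨k, hk⟩ : ∃ k : Nat, length = (k : Int) := ⟨length.toNat, by omega⟩
        subst hk
        rw [PySem.List.slice_natCast_add, PySem.List.slice_to_natCast]
      set part := PySem.List.slice (cs.drop s) none (some length) with hpart
      set r := pyRfindNl part with hr
      have hrlen : r < (part.length : Int) := pyRfindNl_lt_length part
      have hpartlen : (part.length : Int) ≤ length := by
        rw [hpart]
        obtain ⟨k, hk⟩ : ∃ k : Nat, length = (k : Int) := ⟨length.toNat, by omega⟩
        subst hk
        rw [PySem.List.slice_to_natCast]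
        have := List.length_take_le (i := k) (l := cs.drop s)
        omega
      have hrneg : -1 ≤ r := pyRfindNl_ge_neg_one part
      rw [aLoop, bLoop]
      simp only [if_neg hne, if_pos hbig, if_pos hbig']
      rw [← hpart, ← hr]
      by_cases hrpos : r ≥ 0
      · -- newline found: advance by r + 1
        obtain ⟨rn, hrn⟩ : ∃ rn : Nat, r = (rn : Int) := ⟨r.toNat, by omega⟩
        have hstop : r + 1 ≠ 0 := by omega
        have hnlin : pyRfindNlIn cs (s : Int) ((s : Int) + length) = (s : Int) + r := by
          simp only [pyRfindNlIn, hslice, ← hr]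
          rw [if_pos hrpos]
        rw [if_pos hstop, hnlin, if_pos (by omega : (s:Int) + r ≥ 0)]
        have e1 : ((rn : Int) + 1) = ((rn + 1 : Nat) : Int) := by push_cast; ring
        have h1 : PySem.List.slice (cs.drop s) none (some (r + 1))
            = PySem.List.slice cs (some (s : Int)) (some ((s:Int) + r + 1)) := by
          rw [hrn, e1]
          have e3 : (s:Int) + ((rn : Int)) + 1 = (s : Int) + ((rn + 1 : Nat) : Int) := by
            push_cast; ring
          rw [e3, PySem.List.slice_natCast_add, PySem.List.slice_to_natCast]
        have h2 : PySem.List.slice (cs.drop s) (some (r + 1)) none = cs.drop (s + (rn + 1)) := by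
          rw [hrn, e1, PySem.List.slice_from_natCast, List.drop_drop]
        have heq : (s : Int) + r + 1 = ((s + (rn + 1) : Nat) : Int) := by
          rw [hrn]; push_cast; ring
        rw [h1, h2, heq]
        exact ih (s + (rn + 1)) (by omega) (by omega) _
      · -- no newline: advance by length
        have hstop : ¬ (r + 1 ≠ 0) := by simp only [ne_eq, not_not]; omega
        have hnlin : pyRfindNlIn cs (s : Int) ((s : Int) + length) = -1 := by
          simp only [pyRfindNlIn, hslice, ← hr]
          rw [if_neg hrpos]
        rw [if_neg hstop, hnlin, if_neg (by omega : ¬ ((-1:Int) ≥ 0))]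
        obtain ⟨k, hk⟩ : ∃ k : Nat, length = (k : Int) := ⟨length.toNat, by omega⟩
        have h2 : PySem.List.slice (cs.drop s) (some length) none = cs.drop (s + k) := by
          rw [hk, PySem.List.slice_from_natCast, List.drop_drop]
        have heq : (s : Int) + length = ((s + k : Nat) : Int) := by rw [hk]; push_cast; ring
        rw [hslice, h2, heq]
        exact ih (s + k) (by omega) (by omega) _
    · -- last chunk
      have hbig' : ¬ ((cs.length : Int) - (s : Int) > length) := by
        rw [hdlen] at hbig; omega
      rw [aLoop, bLoop]
      simp only [if_neg hne, if_neg hbig, if_neg hbig']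
      rw [PySem.List.slice_from_natCast]

-- ===== VERDICT (by name: the statement is the Claim_ definition above) =====
theorem split_by_length_or_newline_spec : Claim_equal_split_by_length_or_newline := by
  intro x length _ hpre
  unfold Spec_split_by_length_or_newline split_by_length_or_newline split_by_length_or_newline_alt
  rcases hpre with hemp | hlen
  · rw [hemp]; simp [aLoop]
  · simp only []
    by_cases h0 : ((x.toList.length : Int) = 0)
    · have : x.toList = [] := List.length_eq_zero_iff.mp (by exact_mod_cast h0)
      rw [this]; simp [aLoop]
    · rw [if_neg h0]
      have hlt : 0 < x.toList.length := by omega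
      have := loop_eq (x.toList.length + 1) x.toList length 0 hlt hlen (by omega) []
      simp only [List.drop_zero] at this
      rw [this]; norm_num
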